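-- pv_equiv track=rewrite | github.com/human-agent-teaming/efficient-ingredient-substitution | embedding_experiments/normalise_recipes.py | match_ingredients
-- ===== SOURCE A (Python) =====
-- from typing import List, Dict, Set, Union, Tuple
--
-- def match_ingredients(normalized_instruction_tokens: List[str],
--                       synonym_dict: Dict[str, Union[str, None]],
--                       ingredient_names_set: Set[tuple],
--                       n: int) -> List[str]:
--     not_word_tokens = ['.', ',', '!', '?', ' ', ';', ':']
--     new_instruction_tokens = []
--     i = 0
--     while i < len(normalized_instruction_tokens):
--         sublist = normalized_instruction_tokens[i:i + n]
--         if sublist[0] in not_word_tokens or sublist[-1] in not_word_tokens: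
--             new_instruction_tokens.extend(sublist)
--             i += n
--             continue
--         clean_sublist = tuple([token for token in sublist if token not in not_word_tokens])
--         j = 0
--         while j < len(clean_sublist):
--             item = clean_sublist[j]
--             if item in ingredient_names_set:
--                 new_ingredient = synonym_dict.get(item)
--                 if new_ingredient is not None:
--                     new_instruction_tokens.append(new_ingredient)
--                     if j < len(clean_sublist) - 1 and clean_sublist[j + 1] not in not_word_tokens:
--                         new_instruction_tokens.append(' ')
--                     j += 1
--                 else:
--                     new_instruction_tokens.append(item)
--                     if j < len(clean_sublist) - 1 and clean_sublist[j + 1] not in not_word_tokens: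
--                         new_instruction_tokens.append(' ')
--                     j += 1
--             else:
--                 new_instruction_tokens.append(item)
--                 if j < len(clean_sublist) - 1 and clean_sublist[j + 1] not in not_word_tokens:
--                     new_instruction_tokens.append(' ')
--                 j += 1
--         i += n
--
--     return new_instruction_tokens
-- ===== SOURCE B (Python) =====
-- def match_ingredients(normalized_instruction_tokens, synonym_dict, ingredient_names_set, n):
--     # A's substitution test 'item in ingredient_names_set' compares a str against a set of
--     # tuples and can never hold, so synonym_dict / ingredient_names_set never affect the
--     # output; B reproduces A's actual behaviour without that dead machinery: each n-window
--     # whose first or last token is punctuation is copied verbatim, any other window is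
--     # emitted with its punctuation tokens dropped and single ' ' separators in between.
--     punct = {'.', ',', '!', '?', ' ', ';', ':'}
--     out = []
--     rest = normalized_instruction_tokens
--     while rest:
--         window, rest = rest[:n], rest[n:]
--         if window[0] in punct or window[-1] in punct:
--             out += window
--         else:
--             clean = [t for t in window if t not in punct]
--             out += clean[:1] + [x for t in clean[1:] for x in (' ', t)]
--     return out
-- ===== Notes on version B (the rewrite author's own statement) =====
-- stated objective: simpler
-- what changed: A's substitution test 'item in ingredient_names_set' compares a str against a set of tuples and never matches, so the dict/set machinery is dead code; B drops it entirely and, instead of A's index-driven inner while with three duplicated append/lookahead-separator branches, emits each non-punctuation-bounded window as a punctuation-filtered list interleaved with ' ' by slicing, consuming the token list by suffix destructuring rather than an index counter. (B also skips A's per-token set-membership and dict.get calls, a constant-factor saving)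
import Mathlib
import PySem

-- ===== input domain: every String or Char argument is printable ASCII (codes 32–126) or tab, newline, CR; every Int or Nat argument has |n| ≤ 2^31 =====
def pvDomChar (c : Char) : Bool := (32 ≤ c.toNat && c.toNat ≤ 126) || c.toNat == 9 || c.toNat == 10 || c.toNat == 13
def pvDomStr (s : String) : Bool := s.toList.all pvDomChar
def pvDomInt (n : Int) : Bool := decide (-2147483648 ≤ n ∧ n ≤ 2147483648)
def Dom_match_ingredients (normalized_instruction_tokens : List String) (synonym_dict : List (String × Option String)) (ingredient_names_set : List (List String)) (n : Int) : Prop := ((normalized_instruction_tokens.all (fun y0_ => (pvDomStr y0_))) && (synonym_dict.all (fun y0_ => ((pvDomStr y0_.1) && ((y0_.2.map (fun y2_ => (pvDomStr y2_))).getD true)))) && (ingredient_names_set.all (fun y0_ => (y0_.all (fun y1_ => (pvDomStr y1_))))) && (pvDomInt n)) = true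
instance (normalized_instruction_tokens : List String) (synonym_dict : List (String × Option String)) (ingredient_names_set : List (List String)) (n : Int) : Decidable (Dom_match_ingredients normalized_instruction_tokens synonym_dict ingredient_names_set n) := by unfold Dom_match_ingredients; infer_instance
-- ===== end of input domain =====

-- B is simpler: A's str-vs-tuple membership test never matches, so B drops the dead
-- dict/set machinery and emits each window by filter + slice-interleave; A = B on Pre_.

-- not_word_tokens, shared literal constant of both Pythons
def pvNW : List String := [".", ",", "!", "?", " ", ";", ":"]

-- ===== PORT A =====
-- Python '==' between a str and a tuple is always False, so 'item in ingredient_names_set'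
-- (a set of tuples) never holds; this helper transliterates that comparison exactly.
def pvEqStrTuple (s : String) (t : List String) : Bool := false

-- 'if j < len(clean_sublist) - 1 and clean_sublist[j + 1] not in not_word_tokens: append(' ')'
def pvSepA : List String → List String
  | [] => []
  | y :: _ => if pvNW.contains y then [] else [" "]

-- A's inner 'while j < len(clean_sublist)' loop
def pvInnerA (synonym_dict : List (String × Option String)) (ingredient_names_set : List (List String)) : List String → List String
  | [] => []
  | item :: rest =>
    if ingredient_names_set.any (fun t => pvEqStrTuple item t) then
      match PySem.Dict.get? (PySem.Dict.mk synonym_dict) item with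
      | some (some v) => [v] ++ pvSepA rest ++ pvInnerA synonym_dict ingredient_names_set rest
      | _ => [item] ++ pvSepA rest ++ pvInnerA synonym_dict ingredient_names_set rest
    else
      [item] ++ pvSepA rest ++ pvInnerA synonym_dict ingredient_names_set rest

-- body of one iteration of A's outer loop on the window sublist = tokens[i:i+n]
-- (sublist[0] is the head, sublist[-1] the last element; [] is unreachable for n ≥ 1)
def pvStepA (synonym_dict : List (String × Option String)) (ingredient_names_set : List (List String)) : List String → List String
  | [] => []
  | h0 :: t0 =>
    if pvNW.contains h0 || pvNW.contains ((h0 :: t0).getLast (List.cons_ne_nil _ _)) then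
      h0 :: t0
    else
      pvInnerA synonym_dict ingredient_names_set ((h0 :: t0).filter (fun tok => !pvNW.contains tok))

-- A's outer 'while i < len(tokens)' loop; we recurse on the remaining suffix (tokens[i:]),
-- so tokens[i:i+n] is rem.take n.toNat (exact for n ≥ 1).  fuel = rem.length suffices since
-- each step drops n.toNat ≥ 1 elements; Python never returns for n < 1 with nonempty input
-- (IndexError or divergence), so the 'if n < 1 then []' is a pure totality guard outside Pre_.
def pvLoopA (synonym_dict : List (String × Option String)) (ingredient_names_set : List (List String)) (n : Int) : Nat → List String → List String
  | 0, _ => []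
  | _, [] => []
  | fuel + 1, x :: rest =>
    if n < 1 then []
    else
      pvStepA synonym_dict ingredient_names_set ((x :: rest).take n.toNat)
        ++ pvLoopA synonym_dict ingredient_names_set n fuel ((x :: rest).drop n.toNat)

def match_ingredients (normalized_instruction_tokens : List String) (synonym_dict : List (String × Option String)) (ingredient_names_set : List (List String)) (n : Int) : List String :=
  pvLoopA synonym_dict ingredient_names_set n normalized_instruction_tokens.length normalized_instruction_tokens

-- ===== PORT B =====
-- 'clean[:1] + [x for t in clean[1:] for x in (' ', t)]'
def pvEmitB (clean : List String) : List String :=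
  clean.take 1 ++ (clean.drop 1).flatMap (fun t => [" ", t])

-- body of one iteration of B's 'while rest:' loop on window = rest[:n]
def pvStepB : List String → List String
  | [] => []
  | h0 :: t0 =>
    if pvNW.contains h0 || pvNW.contains ((h0 :: t0).getLast (List.cons_ne_nil _ _)) then
      h0 :: t0
    else
      pvEmitB ((h0 :: t0).filter (fun t => !pvNW.contains t))

-- B's 'while rest:' loop, consuming the suffix; same fuel/totality guard remark as pvLoopA.
def pvLoopB (n : Int) : Nat → List String → List String
  | 0, _ => []
  | _, [] => []
  | fuel + 1, x :: rest =>
    if n < 1 then []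
    else
      pvStepB ((x :: rest).take n.toNat) ++ pvLoopB n fuel ((x :: rest).drop n.toNat)

def match_ingredients_alt (normalized_instruction_tokens : List String) (synonym_dict : List (String × Option String)) (ingredient_names_set : List (List String)) (n : Int) : List String :=
  pvLoopB n normalized_instruction_tokens.length normalized_instruction_tokens

-- ===== PRECONDITION & SPEC =====
-- Pre_ excludes exactly the inputs where A does not return: for n < 1 with a nonempty token
-- list Python raises IndexError (empty slice) or loops forever (i += n never advances).
def Pre_match_ingredients (normalized_instruction_tokens : List String) (synonym_dict : List (String × Option String)) (ingredient_names_set : List (List String)) (n : Int) : Prop :=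
  normalized_instruction_tokens = [] ∨ 1 ≤ n
instance (normalized_instruction_tokens : List String) (synonym_dict : List (String × Option String)) (ingredient_names_set : List (List String)) (n : Int) : Decidable (Pre_match_ingredients normalized_instruction_tokens synonym_dict ingredient_names_set n) := by unfold Pre_match_ingredients; infer_instance

def pvWitness_match_ingredients : List String × (List (String × Option String)) × List (List String) × Int :=
  (["add", " ", "tomato"], [("tomato", some "roma")], [["tomato"]], 2)

def Spec_match_ingredients (normalized_instruction_tokens : List String) (synonym_dict : List (String × Option String)) (ingredient_names_set : List (List String)) (n : Int) (out : List String) : Prop := out = match_ingredients_alt normalized_instruction_tokens synonym_dict ingredient_names_set n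
instance (normalized_instruction_tokens : List String) (synonym_dict : List (String × Option String)) (ingredient_names_set : List (List String)) (n : Int) (out : List String) : Decidable (Spec_match_ingredients normalized_instruction_tokens synonym_dict ingredient_names_set n out) := by unfold Spec_match_ingredients; infer_instance

-- ===== CLAIM (what is proved, stated in full; the proofs are below) =====
def Claim_equal_match_ingredients : Prop := ∀ (normalized_instruction_tokens : List String) (synonym_dict : List (String × Option String)) (ingredient_names_set : List (List String)) (n : Int), Dom_match_ingredients normalized_instruction_tokens synonym_dict ingredient_names_set n → Pre_match_ingredients normalized_instruction_tokens synonym_dict ingredient_names_set n → Spec_match_ingredients normalized_instruction_tokens synonym_dict ingredient_names_set n (match_ingredients normalized_instruction_tokens synonym_dict ingredient_names_set n)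

-- ===== LEMMAS AND PROOFS =====

lemma pvInnerA_cons (synonym_dict : List (String × Option String)) (ingredient_names_set : List (List String)) (y : String) (r : List String) :
    pvInnerA synonym_dict ingredient_names_set (y :: r) =
      [y] ++ pvSepA r ++ pvInnerA synonym_dict ingredient_names_set r := by
  simp [pvInnerA, pvEqStrTuple]

-- A's dead membership test makes its inner loop agree with B's filter + interleave emission
lemma pvInnerA_eq_emit (synonym_dict : List (String × Option String)) (ingredient_names_set : List (List String)) :
    ∀ c : List String, (∀ x ∈ c, x ∉ pvNW) →
      pvInnerA synonym_dict ingredient_names_set c = pvEmitB c := by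
  intro c
  induction c with
  | nil => intro _; simp [pvInnerA, pvEmitB]
  | cons y r ih =>
    intro h
    rw [pvInnerA_cons]
    cases r with
    | nil => simp [pvSepA, pvInnerA, pvEmitB]
    | cons z zs =>
      have hz : z ∉ pvNW := h z (by simp)
      rw [ih (fun x hx => h x (by simp [hx]))]
      simp [pvSepA, pvEmitB, hz]

lemma pvStep_eq (synonym_dict : List (String × Option String)) (ingredient_names_set : List (List String)) (w : List String) :
    pvStepA synonym_dict ingredient_names_set w = pvStepB w := by
  cases w with
  | nil => rfl
  | cons h0 t0 =>
    by_cases hg : (pvNW.contains h0 || pvNW.contains ((h0 :: t0).getLast (List.cons_ne_nil _ _))) = true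
    · simp only [pvStepA, pvStepB, hg, if_true]
    · have hclean : ∀ t ∈ (h0 :: t0).filter (fun tok => !pvNW.contains tok), t ∉ pvNW := by
        intro t htmem
        have := List.of_mem_filter htmem
        simpa using this
      simp only [pvStepA, pvStepB, hg, Bool.false_eq_true, if_false]
      exact pvInnerA_eq_emit _ _ _ hclean

lemma pvLoop_eq (synonym_dict : List (String × Option String)) (ingredient_names_set : List (List String)) (n : Int) :
    ∀ (fuel : Nat) (rem : List String),
      pvLoopA synonym_dict ingredient_names_set n fuel rem = pvLoopB n fuel rem := by
  intro fuel
  induction fuel with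
  | zero => intro rem; rfl
  | succ fuel ih =>
    intro rem
    cases rem with
    | nil => rfl
    | cons x rest =>
      by_cases hn : n < 1
      · simp [pvLoopA, pvLoopB, hn]
      · simp only [pvLoopA, pvLoopB, if_neg hn]
        rw [pvStep_eq, ih]

-- ===== VERDICT (by name: the statement is the Claim_ definition above) =====
theorem match_ingredients_spec : Claim_equal_match_ingredients := by
  intro toks syn iset n _ _
  unfold Spec_match_ingredients match_ingredients match_ingredients_alt
  exact pvLoop_eq syn iset n toks.length toks
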